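-- pv_equiv track=rewrite | github.com/409230250/Programming-with-Software-Libraries-on-Python | Project 3/Pro3/indicators.py | Dir_indicator
-- ===== SOURCE A (Python) =====
-- def Dir_indicator(prices,n):
--     '''The N-day directional indicator for a stock is the number of
--        days out of the previous N on which the stock went up minus the
--        number of days out of the previous N on which the stock went down.
--        Take a list of prices and the N-day
--        to make a list of directional indicators(depends on different N).'''
--
--     result=[]
--     for i in range(len(prices)):
--         total=0
--         if n>i:
--             j=i
--         else:
--             j=n
--         for a in range(j):
--             if prices[a+i-j] > prices[a+i+1-j]:
--                 total-=1
--             elif prices[a+i-j] < prices[a+i+1-j]: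
--                 total+=1
--
--         result.append(total)
--     return (result)
-- ===== SOURCE B (Python) =====
-- def Dir_indicator(prices, n):
--     '''N-day directional indicator via prefix sums of sign-of-change: O(len) instead of O(len*n).'''
--     S = [0]
--     for k in range(1, len(prices)):
--         d = prices[k] - prices[k - 1]
--         S.append(S[-1] + (1 if d > 0 else -1 if d < 0 else 0))
--     result = []
--     for i in range(len(prices)):
--         j = max(0, min(i, n))
--         result.append(S[i] - S[i - j])
--     return result
-- ===== Notes on version B (the rewrite author's own statement) =====
-- stated objective: faster
-- what changed: Replaces A's per-day rescan of the whole N-window by a single prefix-sum pass over the sign-of-change array, so each indicator is one subtraction S[i]-S[i-j].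
import Mathlib
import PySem

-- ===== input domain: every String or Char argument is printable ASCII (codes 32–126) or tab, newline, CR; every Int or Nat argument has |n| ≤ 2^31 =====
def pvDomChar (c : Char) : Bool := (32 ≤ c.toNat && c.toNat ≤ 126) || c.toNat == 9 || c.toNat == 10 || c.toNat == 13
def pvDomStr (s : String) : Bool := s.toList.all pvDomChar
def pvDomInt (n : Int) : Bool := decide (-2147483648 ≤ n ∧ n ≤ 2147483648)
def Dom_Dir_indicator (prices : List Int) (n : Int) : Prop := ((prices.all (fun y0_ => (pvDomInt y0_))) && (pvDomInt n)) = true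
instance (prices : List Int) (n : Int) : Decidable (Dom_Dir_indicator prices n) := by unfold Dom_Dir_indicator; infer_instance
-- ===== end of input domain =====

-- B replaces A's O(len*n) rescan of each window by one prefix-sum pass over the sign-of-change
-- array plus O(1) window lookups (objective: faster, asymptotic O(len)).

-- ===== PORT A =====
-- Literal port of A. All list indices A computes are in range, so pyGetD (default 0) is exact here.
def Dir_indicator (prices : List Int) (n : Int) : List Int :=
  (PySem.List.pyRange 0 (prices.length : Int) 1).foldl
    (fun result i =>
      let j : Int := if n > i then i else n
      let total : Int :=
        (PySem.List.pyRange 0 j 1).foldl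
          (fun total a =>
            if PySem.List.pyGetD prices (a + i - j) 0 > PySem.List.pyGetD prices (a + i + 1 - j) 0 then
              total - 1
            else if PySem.List.pyGetD prices (a + i - j) 0 < PySem.List.pyGetD prices (a + i + 1 - j) 0 then
              total + 1
            else total) 0
      result ++ [total]) []

-- ===== PORT B =====
-- Literal port of Source B: build prefix sums S of the sign-of-change (S[-1] is pyGetD S (-1)),
-- then each indicator is one subtraction S[i] - S[i-j].
def Dir_indicator_alt (prices : List Int) (n : Int) : List Int :=
  let S : List Int :=
    (PySem.List.pyRange 1 (prices.length : Int) 1).foldl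
      (fun S k =>
        let d : Int := PySem.List.pyGetD prices k 0 - PySem.List.pyGetD prices (k - 1) 0
        S ++ [PySem.List.pyGetD S (-1) 0 + (if d > 0 then 1 else if d < 0 then -1 else 0)]) [0]
  (PySem.List.pyRange 0 (prices.length : Int) 1).foldl
    (fun result i =>
      let j : Int := max 0 (min i n)
      result ++ [PySem.List.pyGetD S i 0 - PySem.List.pyGetD S (i - j) 0]) []

-- ===== PRECONDITION & SPEC =====
def Spec_Dir_indicator (prices : List Int) (n : Int) (out : List Int) : Prop := out = Dir_indicator_alt prices n
instance (prices : List Int) (n : Int) (out : List Int) : Decidable (Spec_Dir_indicator prices n out) := by unfold Spec_Dir_indicator; infer_instance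

-- ===== CLAIM (what is proved, stated in full; the proofs are below) =====
def Claim_equal_Dir_indicator : Prop := ∀ (prices : List Int) (n : Int), Dom_Dir_indicator prices n → Spec_Dir_indicator prices n (Dir_indicator prices n)

-- ===== LEMMAS AND PROOFS =====

-- prefix sum of sign-of-change over the first m steps (getD-based, total on all indices)
def Fsum (prices : List Int) : Nat → Int
  | 0 => 0
  | m + 1 => Fsum prices m +
      (if prices.getD m 0 < prices.getD (m + 1) 0 then 1
       else if prices.getD (m + 1) 0 < prices.getD m 0 then -1 else 0)

-- window size both programs effectively use at day it
def jn (n : Int) (it : Nat) : Nat := if n < 0 then 0 else min it n.toNat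

-- A's inner loop, with the index shift c = i - j made explicit, sums the sign changes
lemma pv_inner_sum (prices : List Int) (c : Nat) : ∀ (m : Nat) (t : Int),
    (PySem.List.pyRange 0 (m : Int) 1).foldl
      (fun total a =>
        if PySem.List.pyGetD prices (a + (c : Int)) 0 > PySem.List.pyGetD prices (a + (c : Int) + 1) 0 then
          total - 1
        else if PySem.List.pyGetD prices (a + (c : Int)) 0 < PySem.List.pyGetD prices (a + (c : Int) + 1) 0 then
          total + 1
        else total) t = t + (Fsum prices (c + m) - Fsum prices c) := by
  intro m
  induction m with
  | zero => intro t; simp [PySem.List.pyRange_one_eq_nil]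
  | succ m ih =>
    intro t
    have h : ((m + 1 : Nat) : Int) = (m : Int) + 1 := by push_cast; ring
    rw [h, PySem.List.pyRange_one_succ_right (by positivity), List.foldl_append, ih]
    have hc : ((m : Int) + (c : Int)) = ((m + c : Nat) : Int) := by push_cast; ring
    have hc1 : ((m : Int) + (c : Int) + 1) = ((m + c + 1 : Nat) : Int) := by push_cast; ring
    have hc2 : (((m + c : Nat) : Int) + 1) = ((m + c + 1 : Nat) : Int) := by push_cast; ring
    simp only [List.foldl_cons, List.foldl_nil, hc, hc2, PySem.List.pyGetD_natCast]
    have : c + (m + 1) = (c + m) + 1 := by omega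
    rw [this, Fsum]
    have hcm : m + c = c + m := by omega
    rw [hcm]
    split_ifs <;> omega

-- B's prefix-sum list equals Fsum tabulated
lemma S_eq (prices : List Int) : ∀ (m : Nat),
    (PySem.List.pyRange 1 ((m + 1 : Nat) : Int) 1).foldl
      (fun S k =>
        S ++ [PySem.List.pyGetD S (-1) 0 +
          (if PySem.List.pyGetD prices k 0 - PySem.List.pyGetD prices (k - 1) 0 > 0 then 1
           else if PySem.List.pyGetD prices k 0 - PySem.List.pyGetD prices (k - 1) 0 < 0 then -1 else 0)]) [0]
    = (List.range (m + 1)).map (Fsum prices) := by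
  intro m
  induction m with
  | zero => simp [PySem.List.pyRange_one_eq_nil, Fsum]
  | succ m ih =>
    have h : ((m + 2 : Nat) : Int) = ((m + 1 : Nat) : Int) + 1 := by push_cast; ring
    rw [h, PySem.List.pyRange_one_succ_right (by push_cast; omega), List.foldl_append, ih]
    have hr : (List.range (m + 1)).map (Fsum prices)
        = (List.range m).map (Fsum prices) ++ [Fsum prices m] := by
      rw [List.range_succ, List.map_append]; simp
    simp only [List.foldl_cons, List.foldl_nil, hr, PySem.List.pyGetD_neg_one_append_singleton]
    have h1 : ((m + 1 : Nat) : Int) - 1 = ((m : Nat) : Int) := by push_cast; ring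
    rw [List.range_succ, List.range_succ, List.map_append, List.map_append]
    simp only [List.map_cons, List.map_nil, h1, PySem.List.pyGetD_natCast, List.append_assoc,
      List.append_cancel_left_eq]
    have hF : Fsum prices (m + 1) = Fsum prices m +
        (if prices.getD m 0 < prices.getD (m + 1) 0 then 1
         else if prices.getD (m + 1) 0 < prices.getD m 0 then -1 else 0) := rfl
    simp only [List.cons.injEq, and_true, hF]
    split_ifs <;> omega

-- A's element at day it
lemma A_elem (prices : List Int) (n : Int) (it : Nat) :
    (let j : Int := if n > (it : Int) then (it : Int) else n
     (PySem.List.pyRange 0 j 1).foldl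
       (fun total a =>
         if PySem.List.pyGetD prices (a + (it : Int) - j) 0 > PySem.List.pyGetD prices (a + (it : Int) + 1 - j) 0 then
           total - 1
         else if PySem.List.pyGetD prices (a + (it : Int) - j) 0 < PySem.List.pyGetD prices (a + (it : Int) + 1 - j) 0 then
           total + 1
         else total) 0)
    = Fsum prices it - Fsum prices (it - jn n it) := by
  simp only []
  by_cases hni : n > (it : Int)
  · -- full window j = i
    have hj : (if n > (it : Int) then (it : Int) else n) = (it : Int) := by simp [hni]
    rw [hj]
    have hbody : ∀ (total a : Int),
        (if PySem.List.pyGetD prices (a + (it : Int) - (it : Int)) 0 > PySem.List.pyGetD prices (a + (it : Int) + 1 - (it : Int)) 0 then total - 1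
         else if PySem.List.pyGetD prices (a + (it : Int) - (it : Int)) 0 < PySem.List.pyGetD prices (a + (it : Int) + 1 - (it : Int)) 0 then total + 1
         else total)
        = (if PySem.List.pyGetD prices (a + ((0 : Nat) : Int)) 0 > PySem.List.pyGetD prices (a + ((0 : Nat) : Int) + 1) 0 then total - 1
           else if PySem.List.pyGetD prices (a + ((0 : Nat) : Int)) 0 < PySem.List.pyGetD prices (a + ((0 : Nat) : Int) + 1) 0 then total + 1
           else total) := by
      intro total a
      have e1 : a + (it : Int) - (it : Int) = a + ((0 : Nat) : Int) := by push_cast; ring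
      have e2 : a + (it : Int) + 1 - (it : Int) = a + ((0 : Nat) : Int) + 1 := by push_cast; ring
      rw [e1, e2]
    simp only [hbody]
    rw [pv_inner_sum prices 0 it 0]
    have hjn : jn n it = it := by
      unfold jn
      have : ¬ n < 0 := by omega
      simp [this]
      omega
    rw [hjn]
    simp [Fsum]
  · by_cases hneg : n < 0
    · -- negative n: empty range, empty window
      have hj : (if n > (it : Int) then (it : Int) else n) = n := by simp [hni]
      rw [hj, PySem.List.pyRange_one_eq_nil (by omega)]
      have hjn : jn n it = 0 := by unfold jn; simp [hneg]
      rw [hjn]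
      simp
    · -- 0 ≤ n ≤ it : window of size n
      have hj : (if n > (it : Int) then (it : Int) else n) = ((n.toNat : Nat) : Int) := by
        simp [hni]; omega
      rw [hj]
      have hle : n.toNat ≤ it := by omega
      have hbody : ∀ (total a : Int),
          (if PySem.List.pyGetD prices (a + (it : Int) - ((n.toNat : Nat) : Int)) 0 > PySem.List.pyGetD prices (a + (it : Int) + 1 - ((n.toNat : Nat) : Int)) 0 then total - 1
           else if PySem.List.pyGetD prices (a + (it : Int) - ((n.toNat : Nat) : Int)) 0 < PySem.List.pyGetD prices (a + (it : Int) + 1 - ((n.toNat : Nat) : Int)) 0 then total + 1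
           else total)
          = (if PySem.List.pyGetD prices (a + ((it - n.toNat : Nat) : Int)) 0 > PySem.List.pyGetD prices (a + ((it - n.toNat : Nat) : Int) + 1) 0 then total - 1
             else if PySem.List.pyGetD prices (a + ((it - n.toNat : Nat) : Int)) 0 < PySem.List.pyGetD prices (a + ((it - n.toNat : Nat) : Int) + 1) 0 then total + 1
             else total) := by
        intro total a
        have e1 : a + (it : Int) - ((n.toNat : Nat) : Int) = a + ((it - n.toNat : Nat) : Int) := by
          push_cast [hle]; ring
        have e2 : a + (it : Int) + 1 - ((n.toNat : Nat) : Int) = a + ((it - n.toNat : Nat) : Int) + 1 := by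
          push_cast [hle]; ring
        rw [e1, e2]
      simp only [hbody]
      rw [pv_inner_sum prices (it - n.toNat) n.toNat 0]
      have h1 : it - n.toNat + n.toNat = it := by omega
      have hjn : it - jn n it = it - n.toNat := by unfold jn; simp [hneg]; omega
      rw [h1, hjn]
      ring

-- B's element at day it (S already tabulated, it < L)
lemma B_elem (prices : List Int) (n : Int) (L it : Nat) (hit : it < L) :
    PySem.List.pyGetD ((List.range L).map (Fsum prices)) (it : Int) 0
      - PySem.List.pyGetD ((List.range L).map (Fsum prices)) ((it : Int) - max 0 (min (it : Int) n)) 0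
    = Fsum prices it - Fsum prices (it - jn n it) := by
  have hget : ∀ (k : Nat), k < L →
      PySem.List.pyGetD ((List.range L).map (Fsum prices)) (k : Int) 0 = Fsum prices k := by
    intro k hk
    rw [PySem.List.pyGetD_natCast]
    rw [List.getD_eq_getElem?_getD]
    simp [hk]
  by_cases hneg : n < 0
  · have hm : max 0 (min (it : Int) n) = 0 := by omega
    have hjn : jn n it = 0 := by unfold jn; simp [hneg]
    rw [hm, hjn]
    simp only [sub_zero, Nat.sub_zero]
    rw [hget it hit]
  · have hm : max 0 (min (it : Int) n) = ((min it n.toNat : Nat) : Int) := by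
      push_cast; omega
    have hc : (it : Int) - ((min it n.toNat : Nat) : Int) = ((it - min it n.toNat : Nat) : Int) := by
      push_cast; omega
    have hjn : jn n it = min it n.toNat := by unfold jn; simp [hneg]
    rw [hm, hc, hjn, hget it hit, hget _ (by omega)]

-- ===== VERDICT (by name: the statement is the Claim_ definition above) =====
theorem Dir_indicator_spec : Claim_equal_Dir_indicator := by
  intro prices n _
  unfold Spec_Dir_indicator Dir_indicator Dir_indicator_alt
  simp only [PySem.List.foldl_append_singleton_eq_map]
  cases hL : prices.length with
  | zero => simp [PySem.List.pyRange_one_eq_nil]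
  | succ m =>
    rw [S_eq prices m]
    rw [PySem.List.pyRange_zero_natCast, List.map_map, List.map_map]
    apply List.map_congr_left
    intro it hit
    have hitL : it < m + 1 := List.mem_range.mp hit
    simp only [Function.comp]
    rw [B_elem prices n (m + 1) it hitL]
    exact A_elem prices n it
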